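-- pv_equiv track=rewrite | github.com/slevy43/covid-analysis | covid_diagnosed.py | peak_case_count
-- ===== SOURCE A (Python) =====
-- def peak_case_count(case_dict):
--     """
--     Finds the date with the highest case count. Finds the amount of cases for each date. Makes a list of those
--     amounts. Then checks the count dictionary for which date matches the highest case amount.
--     :param case_dict: Dictionary of each week's start date and its corresponding list of cases
--     :return: The date (as a string) which contains the most cases
--     """
--     count_dict = {}                         # start empty dictionary
--     for key in case_dict:                   # for each key in the case dictionary
--         length = len(case_dict[key])        # store the amount of cases for each date
--         count_dict[key] = length            # make dictionary of dates (k) and amount of cases (v)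
--     case_count = list(count_dict.values())  # make list from value (amount of cases) of each date
--     case_count.sort()                       # sorts case counts from lowest to highest
--     for key in count_dict:
--         if count_dict[key] == case_count[-1]:   # finding which date the highest count corresponds to
--             return key                          # return the date of what matches the highest count
-- ===== SOURCE B (Python) =====
-- def peak_case_count(case_dict):
--     by_count = {}                      # case count -> first date with that count
--     for date, cases in case_dict.items():
--         n = len(cases)
--         if n not in by_count:
--             by_count[n] = date
--     return by_count[max(by_count)]
-- ===== Notes on version B (the rewrite author's own statement) =====
-- stated objective: alternative
-- what changed: B replaces A's build-count-dict + sort-all-values + rescan-for-the-max with a single pass building an inverted index count->first date and one max() over its keys.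
-- outside the precondition, e.g. on peak_case_count({}): A returns None, B raises ValueError
import Mathlib
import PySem

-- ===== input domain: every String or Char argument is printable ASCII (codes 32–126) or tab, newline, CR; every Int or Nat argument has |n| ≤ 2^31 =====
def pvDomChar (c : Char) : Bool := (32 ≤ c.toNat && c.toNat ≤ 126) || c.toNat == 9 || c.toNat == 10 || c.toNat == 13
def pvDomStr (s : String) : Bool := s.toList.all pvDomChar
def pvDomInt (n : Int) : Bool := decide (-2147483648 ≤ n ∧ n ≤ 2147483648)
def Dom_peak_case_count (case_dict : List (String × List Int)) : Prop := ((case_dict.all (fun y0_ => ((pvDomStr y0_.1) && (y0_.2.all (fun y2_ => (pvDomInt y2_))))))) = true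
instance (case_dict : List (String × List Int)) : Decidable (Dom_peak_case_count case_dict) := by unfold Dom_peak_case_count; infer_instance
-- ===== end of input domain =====

-- B builds an inverted index count -> first date in one pass and looks up max(index) instead of
-- A's count-dict + sort-of-all-values + rescan; same return value on every nonempty dict.


-- ===== PORT A =====
-- `case_dict[key]` is exact here: the key comes from the dict itself (Pre_ gives Nodup keys),
-- so the `.getD []` default is never used. On an empty dict the highest-count loop never runs
-- and Python falls through to `return None` (not a String): excluded by Pre_.
def peak_case_count (case_dict : List (String × List Int)) : String :=
  let cd : PySem.Dict String (List Int) := PySem.Dict.mk case_dict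
  let count_dict : PySem.Dict String Int :=
    case_dict.foldl
      (fun d kv => d.insert kv.1 ((((cd.get? kv.1).getD []).length : Int))) PySem.Dict.empty
  let case_count : List Int := PySem.List.sorted count_dict.values (fun x => x) false
  match count_dict.items.find? (fun p => decide (some p.2 = PySem.List.pyGet? case_count (-1))) with
  | some p => p.1
  | none => ""          -- Python's implicit `return None`: only reached on the empty dict, outside Pre_

-- ===== PORT B =====
def peak_case_count_alt (case_dict : List (String × List Int)) : String :=
  let by_count : PySem.Dict Int String :=
    case_dict.foldl
      (fun d kv => if d.contains ((kv.2.length : Int)) then d else d.insert ((kv.2.length : Int)) kv.1)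
      PySem.Dict.empty
  match PySem.List.max? by_count.keys (fun x => x) with
  | none => ""          -- max() of an empty dict raises ValueError: excluded by Pre_
  | some m => (by_count.get? m).getD ""

-- ===== PRECONDITION & SPEC =====
-- Pre_ excludes the empty dict, where Python's A falls through to `return None` (no String value)
-- and B raises ValueError, and lists with duplicate keys, which do not represent a Python dict
-- (a dict literal keeps only the last value; the association-list convention reads the first).
def Pre_peak_case_count (case_dict : List (String × List Int)) : Prop :=
  case_dict ≠ [] ∧ (case_dict.map Prod.fst).Nodup
instance (case_dict : List (String × List Int)) : Decidable (Pre_peak_case_count case_dict) := by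
  unfold Pre_peak_case_count; infer_instance
def pvWitness_peak_case_count : (List (String × List Int)) :=
  [("2020-01-01", [1]), ("2020-01-08", [2, 3])]
def Spec_peak_case_count (case_dict : List (String × List Int)) (out : String) : Prop := out = peak_case_count_alt case_dict
instance (case_dict : List (String × List Int)) (out : String) : Decidable (Spec_peak_case_count case_dict out) := by unfold Spec_peak_case_count; infer_instance

-- ===== CLAIM (what is proved, stated in full; the proofs are below) =====
def Claim_equal_peak_case_count : Prop := ∀ (case_dict : List (String × List Int)), Dom_peak_case_count case_dict → Pre_peak_case_count case_dict → Spec_peak_case_count case_dict (peak_case_count case_dict)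


-- ===== LEMMAS AND PROOFS =====


theorem pyGet_neg_one (l : List Int) (h : l ≠ []) : PySem.List.pyGet? l (-1) = some (l.getLast h) := by
  have hl : 0 < l.length := List.length_pos_iff.mpr h
  simp only [PySem.List.pyGet?, PySem.List.pyIdx?]
  rw [if_neg (by omega), if_pos (by exact_mod_cast by omega : -(l.length:Int) ≤ -1)]
  simp only [Option.bind_some]
  norm_num
  rw [List.getLast_eq_getElem]
  rw [List.getElem?_eq_getElem (by omega)]

theorem pairwise_le_getLast (l : List Int) (hp : l.Pairwise (· ≤ ·)) :
    ∀ (h : l ≠ []), ∀ x ∈ l, x ≤ l.getLast h := by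
  induction l with
  | nil => intro h; simp at h
  | cons a t ih =>
    intro h x hx
    cases t with
    | nil => simp at hx; simp [hx]
    | cons b s =>
      rw [List.getLast_cons (by simp)]
      rw [List.pairwise_cons] at hp
      rcases List.mem_cons.mp hx with rfl | hx
      · exact hp.1 _ (List.getLast_mem _)
      · exact ih hp.2 (by simp) x hx

-- B fold characterization
theorem build_get? (l : List (String × List Int)) (d : PySem.Dict Int String) (n : Int) :
    (l.foldl (fun d kv => if d.contains ((kv.2.length : Int)) then d else d.insert ((kv.2.length : Int)) kv.1) d).get? n
      = ((d.get? n).or ((l.find? (fun p => decide ((p.2.length : Int) = n))).map Prod.fst)) := by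
  induction l generalizing d with
  | nil => simp
  | cons p t ih =>
    simp only [List.foldl_cons, List.find?]
    by_cases hn : ((p.2.length : Int) = n)
    · simp only [hn, decide_true]
      by_cases hc : d.contains n
      · rw [if_pos hc]
        rw [ih]
        rw [PySem.Dict.contains_eq_isSome_get?] at hc
        cases hg : d.get? n with
        | none => rw [hg] at hc; simp at hc
        | some v => simp
      · rw [if_neg hc, ih]
        rw [PySem.Dict.contains_eq_isSome_get?] at hc
        cases hg : d.get? n with
        | none =>
          simp only [Option.none_or]
          rw [PySem.Dict.get?_insert_self]
          simp
        | some v => rw [hg] at hc; simp at hc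
    · simp only [hn, decide_false]
      by_cases hc : d.contains ((p.2.length : Int))
      · rw [if_pos hc, ih]
      · rw [if_neg hc, ih, PySem.Dict.get?_insert_of_ne _ _ (by exact fun he => hn he.symm)]

theorem A_items (l : List (String × List Int)) (hnd : (l.map Prod.fst).Nodup) :
    (l.foldl (fun d kv => d.insert kv.1 ((((PySem.Dict.mk l).get? kv.1).getD []).length : Int)) PySem.Dict.empty).items
      = l.map (fun p => (p.1, (p.2.length : Int))) := by
  rw [PySem.Dict.items_foldl_insert_fresh l Prod.fst
      (fun kv => ((((PySem.Dict.mk l).get? kv.1).getD []).length : Int)) PySem.Dict.empty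
      (by intro a ha; simp [PySem.Dict.contains_empty]) hnd]
  simp only [PySem.Dict.empty, List.nil_append]
  apply List.map_congr_left
  intro p hp
  have : (PySem.Dict.mk l).get? p.1 = some p.2 := by
    apply PySem.Dict.get?_of_mem_items
    · exact hp
    · exact hnd
  rw [this]
  simp

theorem B_mem_keys (l : List (String × List Int)) (n : Int) :
    n ∈ (l.foldl (fun d kv => if d.contains ((kv.2.length : Int)) then d else d.insert ((kv.2.length : Int)) kv.1) PySem.Dict.empty).keys
      ↔ ∃ p ∈ l, (p.2.length : Int) = n := by
  rw [← not_iff_not, ← PySem.Dict.get?_eq_none_iff_not_mem_keys, build_get?]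
  simp only [PySem.Dict.get?_empty, Option.none_or, Option.map_eq_none_iff, List.find?_eq_none]
  simp

theorem main_eq (l : List (String × List Int)) (hne : l ≠ []) (hnd : (l.map Prod.fst).Nodup) :
    peak_case_count l = peak_case_count_alt l := by
  simp only [peak_case_count, peak_case_count_alt]
  -- name the pieces
  have hitems := A_items l hnd
  have hvals : (l.foldl (fun d kv => d.insert kv.1 ((((PySem.Dict.mk l).get? kv.1).getD []).length : Int)) PySem.Dict.empty).values
      = l.map (fun p => (p.2.length : Int)) := by
    simp only [PySem.Dict.values, hitems, List.map_map]
    rfl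
  rw [hitems, hvals]
  -- the sorted value list and its last element
  have hperm := PySem.List.sorted_perm (l.map (fun p => (p.2.length : Int))) (fun x => x) false
  have hcs_ne : PySem.List.sorted (l.map (fun p => (p.2.length : Int))) (fun x => x) false ≠ [] := by
    intro h0
    have := hperm.length_eq
    rw [h0] at this
    cases l with
    | nil => exact hne rfl
    | cons a t => simp at this
  rw [pyGet_neg_one _ hcs_ne]
  set last := (PySem.List.sorted (l.map (fun p => (p.2.length : Int))) (fun x => x) false).getLast hcs_ne with hlast_def
  have hlast_mem : last ∈ l.map (fun p => (p.2.length : Int)) :=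
    hperm.mem_iff.mp (List.getLast_mem hcs_ne)
  -- B's max over the index keys
  obtain ⟨m, hm⟩ : ∃ m, PySem.List.max? (l.foldl (fun d kv => if d.contains ((kv.2.length : Int)) then d else d.insert ((kv.2.length : Int)) kv.1) PySem.Dict.empty).keys (fun x => x) = some m := by
    cases hmx : PySem.List.max? (l.foldl (fun d kv => if d.contains ((kv.2.length : Int)) then d else d.insert ((kv.2.length : Int)) kv.1) PySem.Dict.empty).keys (fun x => x) with
    | some m => exact ⟨m, rfl⟩
    | none =>
      rw [PySem.List.max?_eq_none_iff] at hmx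
      cases hl : l with
      | nil => exact absurd hl hne
      | cons a t =>
        have : (a.2.length : Int) ∈ (l.foldl (fun d kv => if d.contains ((kv.2.length : Int)) then d else d.insert ((kv.2.length : Int)) kv.1) PySem.Dict.empty).keys := by
          rw [B_mem_keys]
          exact ⟨a, by rw [hl]; exact List.mem_cons_self, rfl⟩
        rw [hmx] at this
        simp at this
  have hm_mem : ∃ p ∈ l, (p.2.length : Int) = m := (B_mem_keys l m).mp (PySem.List.max?_mem hm)
  -- last = m
  have hml : m = last := by
    have h1 : last ≤ m := by
      apply PySem.List.max?_isMax hm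
      rw [B_mem_keys]
      simpa using hlast_mem
    have h2 : m ≤ last := by
      apply pairwise_le_getLast _ (PySem.List.sorted_pairwise _ _) hcs_ne
      apply hperm.mem_iff.mpr
      obtain ⟨p, hp, hpe⟩ := hm_mem
      exact hpe ▸ List.mem_map_of_mem hp
    omega
  rw [hm]
  simp only [build_get?, PySem.Dict.get?_empty, Option.none_or, Option.some.injEq, List.find?_map]
  -- both sides are the first entry whose count equals the maximum
  obtain ⟨q, hq⟩ : ∃ q, l.find? (fun p => decide ((p.2.length : Int) = m)) = some q := by
    have : (l.find? (fun p => decide ((p.2.length : Int) = m))).isSome = true := by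
      rw [List.find?_isSome]
      obtain ⟨p, hp, hpe⟩ := hm_mem
      exact ⟨p, hp, by simp [hpe]⟩
    exact Option.isSome_iff_exists.mp this
  have hpred : ((fun p : String × Int => decide (p.2 = last)) ∘ (fun p : String × List Int => (p.1, (p.2.length : Int))))
      = fun p : String × List Int => decide ((p.2.length : Int) = m) := by
    funext p
    simp [Function.comp, hml]
  rw [hpred, hq]
  simp


-- ===== VERDICT (by name: the statement is the Claim_ definition above) =====
theorem peak_case_count_spec : Claim_equal_peak_case_count := by
  intro l _ hpre
  unfold Spec_peak_case_count
  exact main_eq l hpre.1 hpre.2
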